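-- pv_equiv track=rewrite | github.com/brothertonhistory-rgb/basketballgame | season.py | _get_quadrant
-- ===== SOURCE A (Python) =====
-- _Q_HOME    = [(75, 1), (50, 2), (25, 3)]   # (min_prestige, quadrant)
--
-- _Q_NEUTRAL = [(65, 1), (40, 2), (20, 3)]
--
-- _Q_AWAY    = [(55, 1), (30, 2), (15, 3)]
--
-- def _get_quadrant(opp_prestige, is_home, is_neutral=False):
--     """Returns quadrant (1-4) for a game based on opponent prestige and location."""
--     if is_neutral:
--         thresholds = _Q_NEUTRAL
--     elif is_home:
--         thresholds = _Q_HOME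
--     else:
--         thresholds = _Q_AWAY
--
--     for min_p, quad in thresholds:
--         if opp_prestige >= min_p:
--             return quad
--     return 4
-- ===== SOURCE B (Python) =====
-- _Q_HOME    = [(75, 1), (50, 2), (25, 3)]   # (min_prestige, quadrant)
--
-- _Q_NEUTRAL = [(65, 1), (40, 2), (20, 3)]
--
-- _Q_AWAY    = [(55, 1), (30, 2), (15, 3)]
--
-- def _get_quadrant(opp_prestige, is_home, is_neutral=False):
--     """Quadrant = 4 minus the number of thresholds the prestige meets."""
--     if is_neutral:
--         mins = (65, 40, 20)
--     elif is_home: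
--         mins = (75, 50, 25)
--     else:
--         mins = (55, 30, 15)
--     return 4 - sum(opp_prestige >= m for m in mins)
-- ===== Notes on version B (the rewrite author's own statement) =====
-- stated objective: simpler
-- what changed: Replaces the early-return scan of (min,quadrant) pairs with a single arithmetic formula: 4 minus the count of thresholds met, exploiting that quadrant labels are contiguous 1,2,3.
import Mathlib
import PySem

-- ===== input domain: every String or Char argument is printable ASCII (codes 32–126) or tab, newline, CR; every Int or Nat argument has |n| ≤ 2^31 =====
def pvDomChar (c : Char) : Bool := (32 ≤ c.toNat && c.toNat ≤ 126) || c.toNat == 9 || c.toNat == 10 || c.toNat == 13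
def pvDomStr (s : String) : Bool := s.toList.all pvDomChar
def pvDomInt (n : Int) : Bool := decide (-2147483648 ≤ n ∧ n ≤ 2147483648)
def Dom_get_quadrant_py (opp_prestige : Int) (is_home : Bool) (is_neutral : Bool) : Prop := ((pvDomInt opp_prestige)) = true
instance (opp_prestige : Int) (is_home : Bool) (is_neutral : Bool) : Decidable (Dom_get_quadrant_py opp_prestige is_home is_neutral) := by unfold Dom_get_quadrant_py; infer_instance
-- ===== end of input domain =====

-- B replaces the early-return threshold scan with one arithmetic formula (4 minus count of thresholds met); objective: simpler.
-- ===== PORT A =====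
-- A-side: the threshold tables and the first-match scan, transliterated.
def qHome : List (Int × Int) := [(75, 1), (50, 2), (25, 3)]
def qNeutral : List (Int × Int) := [(65, 1), (40, 2), (20, 3)]
def qAway : List (Int × Int) := [(55, 1), (30, 2), (15, 3)]

def qScan (opp_prestige : Int) : List (Int × Int) → Int
  | [] => 4
  | (min_p, quad) :: rest =>
      if opp_prestige ≥ min_p then quad else qScan opp_prestige rest

def get_quadrant_py (opp_prestige : Int) (is_home : Bool) (is_neutral : Bool) : Int :=
  let thresholds := if is_neutral then qNeutral else if is_home then qHome else qAway
  qScan opp_prestige thresholds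

-- ===== PORT B =====
-- B-side: 4 minus the number of thresholds met (sum of booleans over the mins tuple).
def get_quadrant_py_alt (opp_prestige : Int) (is_home : Bool) (is_neutral : Bool) : Int :=
  let mins : List Int := if is_neutral then [65, 40, 20] else if is_home then [75, 50, 25] else [55, 30, 15]
  4 - (mins.map (fun m => if opp_prestige ≥ m then (1 : Int) else 0)).sum

-- ===== PRECONDITION & SPEC =====
def Spec_get_quadrant_py (opp_prestige : Int) (is_home : Bool) (is_neutral : Bool) (out : Int) : Prop := out = get_quadrant_py_alt opp_prestige is_home is_neutral
instance (opp_prestige : Int) (is_home : Bool) (is_neutral : Bool) (out : Int) : Decidable (Spec_get_quadrant_py opp_prestige is_home is_neutral out) := by unfold Spec_get_quadrant_py; infer_instance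

-- ===== CLAIM (what is proved, stated in full; the proofs are below) =====
def Claim_equal_get_quadrant_py : Prop := ∀ (opp_prestige : Int) (is_home : Bool) (is_neutral : Bool), Dom_get_quadrant_py opp_prestige is_home is_neutral → Spec_get_quadrant_py opp_prestige is_home is_neutral (get_quadrant_py opp_prestige is_home is_neutral)

-- ===== LEMMAS AND PROOFS =====

-- ===== VERDICT (by name: the statement is the Claim_ definition above) =====
theorem get_quadrant_py_spec : Claim_equal_get_quadrant_py := by
  intro p h n _
  unfold Spec_get_quadrant_py get_quadrant_py get_quadrant_py_alt qScan qHome qNeutral qAway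
  cases h <;> cases n <;> simp only [if_true, if_false, Bool.false_eq_true, qScan, List.map, List.sum_cons, List.sum_nil] <;> split_ifs <;> omega
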